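-- pv_equiv track=rewrite | github.com/CyberRN-Mulla/PRODIGY_CS_02 | imgcrypt.py | xor_pixels
-- ===== SOURCE A (Python) =====
-- def xor_pixels(pixels, key_bytes):
--     klen = len(key_bytes)
--     out = []
--     # apply XOR to R,G,B in repeated fashion using key_bytes
--     for i, (r, g, b) in enumerate(pixels):
--         rb = r ^ key_bytes[(3*i) % klen]
--         gb = g ^ key_bytes[(3*i + 1) % klen]
--         bb = b ^ key_bytes[(3*i + 2) % klen]
--         out.append((rb, gb, bb))
--     return out
-- ===== SOURCE B (Python) =====
-- def xor_pixels(pixels, key_bytes):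
--     # flatten channels, XOR against a cyclically-walked key pointer, regroup by 3
--     flat = [c for (r, g, b) in pixels for c in (r, g, b)]
--     k = 0
--     res = []
--     for c in flat:
--         res.append(c ^ key_bytes[k])
--         k = k + 1 if k + 1 < len(key_bytes) else 0
--     it = iter(res)
--     return list(zip(it, it, it))
-- ===== Notes on version B (the rewrite author's own statement) =====
-- stated objective: alternative
-- what changed: Replaces per-pixel enumerate with explicit (3*i+j) % klen modular indexing by flattening the pixels into one channel stream walked against a cyclic key pointer (increment-and-wrap, no modulo), then regrouping every 3 XORed values into a pixel via the zip(it,it,it) idiom.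
import Mathlib
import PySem

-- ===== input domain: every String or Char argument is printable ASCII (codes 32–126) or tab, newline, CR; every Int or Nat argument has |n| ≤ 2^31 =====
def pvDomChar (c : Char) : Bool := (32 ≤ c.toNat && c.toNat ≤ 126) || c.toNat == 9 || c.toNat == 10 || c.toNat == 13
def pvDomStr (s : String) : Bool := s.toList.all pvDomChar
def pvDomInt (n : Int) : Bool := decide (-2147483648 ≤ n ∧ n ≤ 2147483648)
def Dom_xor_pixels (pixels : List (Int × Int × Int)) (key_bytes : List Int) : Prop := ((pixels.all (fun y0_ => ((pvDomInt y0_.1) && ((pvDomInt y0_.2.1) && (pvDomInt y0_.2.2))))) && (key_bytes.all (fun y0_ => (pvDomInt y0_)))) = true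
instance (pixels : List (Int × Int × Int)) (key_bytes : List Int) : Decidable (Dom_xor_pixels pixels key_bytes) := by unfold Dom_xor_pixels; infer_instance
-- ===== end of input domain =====

-- B flattens the pixels to one channel stream, XORs it against a cyclic key pointer
-- (increment-and-wrap instead of modular indexing) and regroups by 3: an alternative
-- decomposition of the same O(n) work, proved to return A's exact value.


-- ===== PORT A =====
-- the enumerate loop, as the obvious structural recursion carrying the index i and out;
-- key_bytes[(3*i+j) % klen] is in range whenever klen > 0 (Pre_), so pyGetD is exact there
def xorALoop (key_bytes : List Int) (i : Int) (ps : List (Int × Int × Int))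
    (out : List (Int × Int × Int)) : List (Int × Int × Int) :=
  match ps with
  | [] => out
  | (r, g, b) :: t =>
    let klen : Int := key_bytes.length
    let rb := PySem.Int.bxor r (PySem.List.pyGetD key_bytes (PySem.Int.mod (3*i) klen) 0)
    let gb := PySem.Int.bxor g (PySem.List.pyGetD key_bytes (PySem.Int.mod (3*i + 1) klen) 0)
    let bb := PySem.Int.bxor b (PySem.List.pyGetD key_bytes (PySem.Int.mod (3*i + 2) klen) 0)
    xorALoop key_bytes (i + 1) t (out ++ [(rb, gb, bb)])

def xor_pixels (pixels : List (Int × Int × Int)) (key_bytes : List Int) : List (Int × Int × Int) :=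
  xorALoop key_bytes 0 pixels []

-- ===== PORT B =====
-- B's XOR loop over the flat channel stream, carrying the wrap-around key pointer k and res;
-- key_bytes[k] is in range whenever klen > 0 (Pre_), so pyGetD is exact there
def xorBLoop (key_bytes : List Int) (k : Int) (cs : List Int) (res : List Int) : List Int :=
  match cs with
  | [] => res
  | c :: t =>
    xorBLoop key_bytes (if k + 1 < (key_bytes.length : Int) then k + 1 else 0) t
      (res ++ [PySem.Int.bxor c (PySem.List.pyGetD key_bytes k 0)])

-- list(zip(it, it, it)) on a single iterator: consume the list three at a time
def chunk3 : List Int → List (Int × Int × Int)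
  | a :: b :: c :: t => (a, b, c) :: chunk3 t
  | _ => []

def xor_pixels_alt (pixels : List (Int × Int × Int)) (key_bytes : List Int) : List (Int × Int × Int) :=
  let flat := pixels.flatMap (fun p => [p.1, p.2.1, p.2.2])
  chunk3 (xorBLoop key_bytes 0 flat [])

-- ===== PRECONDITION & SPEC =====
-- Pre_ excludes only inputs where A raises: empty key_bytes with non-empty pixels is a
-- ZeroDivisionError in A (modulo by zero); B raises there too (IndexError).
def Pre_xor_pixels (pixels : List (Int × Int × Int)) (key_bytes : List Int) : Prop :=
  key_bytes ≠ [] ∨ pixels = []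
instance (pixels : List (Int × Int × Int)) (key_bytes : List Int) : Decidable (Pre_xor_pixels pixels key_bytes) := by unfold Pre_xor_pixels; infer_instance
def pvWitness_xor_pixels : (List (Int × Int × Int)) × List Int := ([(1, 2, 3), (4, 200, 6)], [7, 250])

def Spec_xor_pixels (pixels : List (Int × Int × Int)) (key_bytes : List Int) (out : List (Int × Int × Int)) : Prop := out = xor_pixels_alt pixels key_bytes
instance (pixels : List (Int × Int × Int)) (key_bytes : List Int) (out : List (Int × Int × Int)) : Decidable (Spec_xor_pixels pixels key_bytes out) := by unfold Spec_xor_pixels; infer_instance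

-- ===== CLAIM (what is proved, stated in full; the proofs are below) =====
def Claim_equal_xor_pixels : Prop := ∀ (pixels : List (Int × Int × Int)) (key_bytes : List Int), Dom_xor_pixels pixels key_bytes → Pre_xor_pixels pixels key_bytes → Spec_xor_pixels pixels key_bytes (xor_pixels pixels key_bytes)

-- ===== LEMMAS AND PROOFS =====

-- accumulator-free forms
def xorAList (key_bytes : List Int) (i : Int) : List (Int × Int × Int) → List (Int × Int × Int)
  | [] => []
  | (r, g, b) :: t =>
    let klen : Int := key_bytes.length
    (PySem.Int.bxor r (PySem.List.pyGetD key_bytes (PySem.Int.mod (3*i) klen) 0),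
     PySem.Int.bxor g (PySem.List.pyGetD key_bytes (PySem.Int.mod (3*i + 1) klen) 0),
     PySem.Int.bxor b (PySem.List.pyGetD key_bytes (PySem.Int.mod (3*i + 2) klen) 0)) ::
    xorAList key_bytes (i + 1) t

def xorBList (key_bytes : List Int) (k : Int) : List Int → List Int
  | [] => []
  | c :: t =>
    PySem.Int.bxor c (PySem.List.pyGetD key_bytes k 0) ::
    xorBList key_bytes (if k + 1 < (key_bytes.length : Int) then k + 1 else 0) t

theorem xorALoop_eq (key_bytes : List Int) (ps : List (Int × Int × Int)) :
    ∀ (i : Int) (out : List (Int × Int × Int)),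
      xorALoop key_bytes i ps out = out ++ xorAList key_bytes i ps := by
  induction ps with
  | nil => intro i out; simp [xorALoop, xorAList]
  | cons p t ih =>
    intro i out
    obtain ⟨r, g, b⟩ := p
    simp [xorALoop, xorAList, ih]

theorem xorBLoop_eq (key_bytes : List Int) (cs : List Int) :
    ∀ (k : Int) (res : List Int),
      xorBLoop key_bytes k cs res = res ++ xorBList key_bytes k cs := by
  induction cs with
  | nil => intro k res; simp [xorBLoop, xorBList]
  | cons c t ih =>
    intro k res
    simp [xorBLoop, xorBList, ih]

-- the wrap-around pointer step computes the successor modulo klen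
theorem step_mod (m klen : Int) (h : 0 < klen) :
    (if PySem.Int.mod m klen + 1 < klen then PySem.Int.mod m klen + 1 else 0)
      = PySem.Int.mod (m + 1) klen := by
  rw [PySem.Int.mod_eq_emod_of_pos h, PySem.Int.mod_eq_emod_of_pos h]
  have h0 : 0 ≤ m % klen := Int.emod_nonneg m (by omega)
  have h1 : m % klen < klen := Int.emod_lt_of_pos m h
  have hadd : (m + 1) % klen = (m % klen + 1) % klen := by
    rw [Int.add_emod m 1, Int.add_emod (m % klen) 1, Int.emod_emod_of_dvd m (dvd_refl klen)]
  by_cases hc : m % klen + 1 < klen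
  · rw [if_pos hc, hadd, Int.emod_eq_of_lt (by omega) hc]
  · rw [if_neg hc, hadd]
    have : m % klen + 1 = klen := by omega
    simp [this]

-- core: walking the flat stream from pointer (3*i) % klen and regrouping
-- reproduces A's per-pixel modular indexing
theorem chunk3_xorBList (key_bytes : List Int) (h : key_bytes ≠ [])
    (ps : List (Int × Int × Int)) :
    ∀ (i : Int),
      chunk3 (xorBList key_bytes (PySem.Int.mod (3*i) (key_bytes.length : Int))
        (ps.flatMap (fun p => [p.1, p.2.1, p.2.2])))
      = xorAList key_bytes i ps := by
  have hpos : (0 : Int) < (key_bytes.length : Int) := by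
    have := List.length_pos_iff.mpr h; exact_mod_cast this
  induction ps with
  | nil => intro i; simp [xorBList, chunk3, xorAList]
  | cons p t ih =>
    intro i
    obtain ⟨r, g, b⟩ := p
    simp only [List.flatMap_cons, List.cons_append, List.nil_append, xorBList,
      xorAList, chunk3]
    rw [step_mod _ _ hpos, step_mod _ _ hpos, step_mod _ _ hpos]
    have e2 : 3 * i + 1 + 1 = 3 * i + 2 := by ring
    have e3 : 3 * i + 2 + 1 = 3 * (i + 1) := by ring
    rw [e2, e3]
    exact congrArg (List.cons _) (ih (i + 1))

-- ===== VERDICT (by name: the statement is the Claim_ definition above) =====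
theorem xor_pixels_spec : Claim_equal_xor_pixels := by
  intro pixels key_bytes _ hpre
  unfold Spec_xor_pixels xor_pixels xor_pixels_alt
  rcases hpre with h | h
  · have hpos : (0 : Int) < (key_bytes.length : Int) := by
      have := List.length_pos_iff.mpr h; exact_mod_cast this
    rw [xorALoop_eq]
    show [] ++ xorAList key_bytes 0 pixels
        = chunk3 (xorBLoop key_bytes 0 (pixels.flatMap fun p => [p.1, p.2.1, p.2.2]) [])
    rw [xorBLoop_eq, List.nil_append, List.nil_append]
    have h0 : (0 : Int) = PySem.Int.mod (3 * 0) (key_bytes.length : Int) := by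
      rw [PySem.Int.mod_eq_emod_of_pos hpos]; norm_num
    conv_rhs => rw [h0]
    exact (chunk3_xorBList key_bytes h pixels 0).symm
  · subst h; simp [xorALoop, xorBLoop, chunk3]
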